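-- pv_equiv track=rewrite | github.com/jstimpfle/python-wsl | wsl/schema.py | _valid_key_columns
-- ===== SOURCE A (Python) =====
-- def _valid_key_columns(columns, num_columns):
--     for i in columns:
--         if not 0 <= i < num_columns:
--             return False
--     for i, j in zip(columns, columns[1:]):
--         if not i < j:
--             return False
--     return True
-- ===== SOURCE B (Python) =====
-- def _valid_key_columns(columns, num_columns):
--     if not columns:
--         return True
--     if min(columns) < 0 or max(columns) >= num_columns:
--         return False
--     return list(columns) == sorted(columns) and len(set(columns)) == len(columns)
-- ===== Notes on version B (the rewrite author's own statement) =====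
-- stated objective: simpler
-- what changed: Replaces A's two element-wise scans (range check, then adjacent-pair comparison over zip) by a whole-list characterization: min/max bounds for the range check and 'equal to its sorted self and all elements distinct' for strict increase.
import Mathlib
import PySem

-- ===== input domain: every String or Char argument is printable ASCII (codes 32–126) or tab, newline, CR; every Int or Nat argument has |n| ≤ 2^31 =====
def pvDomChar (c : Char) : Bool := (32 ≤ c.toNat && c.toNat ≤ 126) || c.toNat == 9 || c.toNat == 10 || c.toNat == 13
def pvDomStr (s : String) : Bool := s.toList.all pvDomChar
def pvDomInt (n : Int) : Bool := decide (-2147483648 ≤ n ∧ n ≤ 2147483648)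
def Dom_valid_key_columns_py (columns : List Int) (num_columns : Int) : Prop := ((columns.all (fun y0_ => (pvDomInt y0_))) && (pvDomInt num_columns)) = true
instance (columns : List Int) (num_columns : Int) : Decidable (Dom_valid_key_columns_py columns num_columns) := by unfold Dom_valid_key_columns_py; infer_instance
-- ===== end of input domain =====

-- B replaces A's two element-wise scans by whole-list checks (min/max bounds; equal to its
-- sorted self and all-distinct): simpler to read, same exact return value.

-- ===== PORT A =====
-- first loop: 'for i in columns: if not 0 <= i < num_columns: return False'
def pvARange : List Int → Int → Bool
  | [], _ => true
  | i :: rest, n => if !(decide (0 ≤ i) && decide (i < n)) then false else pvARange rest n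

-- second loop: 'for i, j in zip(columns, columns[1:]): if not i < j: return False'
def pvAPairs : List (Int × Int) → Bool
  | [] => true
  | (i, j) :: rest => if !decide (i < j) then false else pvAPairs rest

def valid_key_columns_py (columns : List Int) (num_columns : Int) : Bool :=
  if pvARange columns num_columns then
    pvAPairs (columns.zip (PySem.List.slice columns (some 1) none))
  else false

-- ===== PORT B =====
def valid_key_columns_py_alt (columns : List Int) (num_columns : Int) : Bool :=
  if columns = [] then true
  else
    match PySem.List.min? columns (fun x => x), PySem.List.max? columns (fun x => x) with
    | some mn, some mx =>
      if mn < 0 || num_columns ≤ mx then false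
      else decide (columns = PySem.List.sorted columns (fun x => x))
           && decide ((PySem.Set.ofList columns).length = columns.length)
    | _, _ => false  -- unreachable: columns ≠ []

-- ===== PRECONDITION & SPEC =====
def Spec_valid_key_columns_py (columns : List Int) (num_columns : Int) (out : Bool) : Prop := out = valid_key_columns_py_alt columns num_columns
instance (columns : List Int) (num_columns : Int) (out : Bool) : Decidable (Spec_valid_key_columns_py columns num_columns out) := by unfold Spec_valid_key_columns_py; infer_instance

-- ===== CLAIM (what is proved, stated in full; the proofs are below) =====
def Claim_equal_valid_key_columns_py : Prop := ∀ (columns : List Int) (num_columns : Int), Dom_valid_key_columns_py columns num_columns → Spec_valid_key_columns_py columns num_columns (valid_key_columns_py columns num_columns)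

-- ===== LEMMAS AND PROOFS =====

theorem pvARange_eq (xs : List Int) (n : Int) :
    pvARange xs n = decide (∀ i ∈ xs, 0 ≤ i ∧ i < n) := by
  induction xs with
  | nil => simp [pvARange]
  | cons x rest ih =>
    simp only [pvARange, ih, List.forall_mem_cons]
    by_cases h0 : 0 ≤ x <;> by_cases h1 : x < n <;> simp [h0, h1]

theorem pvAPairs_zip_tail (xs : List Int) :
    pvAPairs (xs.zip xs.tail) = true ↔ xs.Pairwise (· < ·) := by
  induction xs with
  | nil => simp [pvAPairs]
  | cons x rest ih =>
    cases rest with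
    | nil => simp [pvAPairs]
    | cons y t =>
      by_cases h : x < y
      · simp only [List.tail_cons, List.zip_cons_cons, pvAPairs, h, decide_true,
          Bool.not_true, Bool.false_eq_true, if_false]
        rw [show (y :: t).zip t = (y :: t).zip (y :: t).tail from rfl, ih]
        constructor
        · intro hp
          refine List.Pairwise.cons ?_ hp
          intro z hz
          rcases List.mem_cons.mp hz with rfl | hz
          · exact h
          · exact lt_trans h (List.rel_of_pairwise_cons hp hz)
        · intro hp
          exact hp.of_cons
      · simp only [List.tail_cons, List.zip_cons_cons, pvAPairs, h, decide_false,
          Bool.not_false, if_true]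
        exact ⟨fun hf => absurd hf Bool.false_ne_true,
          fun hp => (h (List.rel_of_pairwise_cons hp List.mem_cons_self)).elim⟩

theorem foldl_add_length_le (xs : List Int) (acc : PySem.Set Int) :
    (xs.foldl PySem.Set.add acc).length ≤ acc.length + xs.length := by
  induction xs generalizing acc with
  | nil => simp
  | cons x t ih =>
    simp only [List.foldl_cons]
    refine le_trans (ih (PySem.Set.add acc x)) ?_
    simp only [PySem.Set.add]
    split_ifs <;> simp <;> omega

theorem foldl_add_length_eq_iff (xs : List Int) (acc : PySem.Set Int) (hacc : acc.Nodup) :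
    (xs.foldl PySem.Set.add acc).length = acc.length + xs.length ↔ (acc ++ xs).Nodup := by
  induction xs generalizing acc with
  | nil => simp [hacc]
  | cons x t ih =>
    simp only [List.foldl_cons, PySem.Set.add]
    by_cases hx : x ∈ acc
    · have hc : PySem.Set.contains acc x = true := by simp [PySem.Set.contains, hx]
      rw [if_pos hc]
      constructor
      · intro hlen
        have := foldl_add_length_le t acc
        simp only [List.length_cons] at hlen
        omega
      · intro hnd
        exact ((List.disjoint_of_nodup_append hnd) hx List.mem_cons_self).elim
    · have hc : ¬ PySem.Set.contains acc x = true := by simp [PySem.Set.contains, hx]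
      rw [if_neg hc]
      have hacc' : (acc ++ [x]).Nodup := by
        simp only [List.nodup_append, hacc, List.nodup_singleton, true_and]
        exact fun a ha b hb h => hx ((h.trans (List.mem_singleton.mp hb)) ▸ ha)
      have hiff := ih (acc ++ [x]) hacc'
      have hassoc : acc ++ [x] ++ t = acc ++ (x :: t) := by simp
      rw [hassoc] at hiff
      rw [← hiff]
      have hlen : (acc ++ [x]).length = acc.length + 1 := by simp
      rw [hlen, List.length_cons]
      constructor <;> (intro h; omega)

theorem ofList_length_eq_iff (xs : List Int) :
    (PySem.Set.ofList xs).length = xs.length ↔ xs.Nodup := by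
  have := foldl_add_length_eq_iff xs PySem.Set.empty (by simp [PySem.Set.empty])
  simpa [PySem.Set.ofList, PySem.Set.empty] using this

-- B's tail test characterizes strict increase
theorem sorted_nodup_iff_pairwise (xs : List Int) :
    (xs = PySem.List.sorted xs (fun x => x) ∧ (PySem.Set.ofList xs).length = xs.length)
      ↔ xs.Pairwise (· < ·) := by
  rw [ofList_length_eq_iff]
  constructor
  · rintro ⟨hs, hnd⟩
    have hle : xs.Pairwise (fun a b => a ≤ b) := by
      have := PySem.List.sorted_pairwise xs (fun x => x)
      rw [← hs] at this
      exact this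
    exact (List.Pairwise.and hle hnd).imp (fun h => lt_of_le_of_ne h.1 h.2)
  · intro hp
    exact ⟨(PySem.List.sorted_eq_of_perm_of_pairwise_lt xs xs (fun x => x)
             (List.Perm.refl xs) hp).symm, hp.imp (fun h => ne_of_lt h)⟩

-- ===== VERDICT (by name: the statement is the Claim_ definition above) =====
theorem valid_key_columns_py_spec : Claim_equal_valid_key_columns_py := by
  intro columns n _
  unfold Spec_valid_key_columns_py valid_key_columns_py valid_key_columns_py_alt
  by_cases hne : columns = []
  · subst hne; simp [pvARange, pvAPairs, PySem.List.slice]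
  · simp only [hne, if_false]
    obtain ⟨mn, hmn⟩ : ∃ m, PySem.List.min? columns (fun x => x) = some m := by
      cases h : PySem.List.min? columns (fun x => x) with
      | none => exact absurd ((PySem.List.min?_eq_none_iff columns _).mp h) hne
      | some m => exact ⟨m, rfl⟩
    obtain ⟨mx, hmx⟩ : ∃ m, PySem.List.max? columns (fun x => x) = some m := by
      cases h : PySem.List.max? columns (fun x => x) with
      | none => exact absurd ((PySem.List.max?_eq_none_iff columns _).mp h) hne
      | some m => exact ⟨m, rfl⟩
    rw [hmn, hmx, PySem.List.slice_from_one, pvARange_eq]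
    have hrange : (∀ i ∈ columns, 0 ≤ i ∧ i < n) ↔ ¬(mn < 0 ∨ n ≤ mx) := by
      constructor
      · intro h
        have h1 := h mn (PySem.List.min?_mem hmn)
        have h2 := h mx (PySem.List.max?_mem hmx)
        omega
      · intro h i hi
        have h1 := PySem.List.min?_isMin hmn i hi
        have h2 := PySem.List.max?_isMax hmx i hi
        simp only at h1 h2
        omega
    by_cases hb : mn < 0 ∨ n ≤ mx
    · have hno : ¬(∀ i ∈ columns, 0 ≤ i ∧ i < n) := fun h => (hrange.mp h) hb
      rw [decide_eq_false hno]
      simp only [Bool.false_eq_true, if_false]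
      rcases hb with hb | hb <;> simp [hb]
    · have hall : ∀ i ∈ columns, 0 ≤ i ∧ i < n := hrange.mpr hb
      rw [decide_eq_true hall]
      have hmn0 : ¬ mn < 0 := fun h => hb (Or.inl h)
      have hmxn : ¬ n ≤ mx := fun h => hb (Or.inr h)
      simp only [if_true, decide_eq_false hmn0, decide_eq_false hmxn, Bool.or_self,
        Bool.false_eq_true, if_false]
      rw [Bool.eq_iff_iff]
      rw [pvAPairs_zip_tail]
      simp only [Bool.and_eq_true, decide_eq_true_eq]
      exact (sorted_nodup_iff_pairwise columns).symm
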